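-- pv_equiv track=rewrite | github.com/lowmason/naics-embedder | src/naics_embedder/graph_model/evaluation.py | _sorted_embedding_columns
-- ===== SOURCE A (Python) =====
-- from typing import Dict, List, Optional, Sequence, Tuple, Union
--
-- def _sorted_embedding_columns(columns: Sequence[str], prefix: str) -> List[str]:
--     '''Return embedding columns sorted numerically by suffix.'''
--
--     relevant = [col for col in columns if col.startswith(prefix)]
--     if not relevant:
--         return []
--
--     def _sort_key(name: str) -> Tuple[int, Union[int, str]]:
--         suffix = name[len(prefix):]
--         return (0, int(suffix)) if suffix.isdigit() else (1, suffix)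
--
--     return sorted(relevant, key=_sort_key)
-- ===== SOURCE B (Python) =====
-- def _sorted_embedding_columns(columns, prefix):
--     """Return embedding columns sorted numerically by suffix.
--
--     Partition-then-sort re-implementation: one pass splits the
--     prefix-filtered names into numeric-suffix and other names, each
--     bucket is sorted by its own simple key, and the buckets are
--     concatenated (numeric first), matching the tuple-keyed sort.
--     """
--     relevant = [col for col in columns if col.startswith(prefix)]
--     if not relevant:
--         return []
--
--     nums, others = [], []
--     for col in relevant:
--         if col[len(prefix):].isdigit():
--             nums.append(col)
--         else:
--             others.append(col)
--
--     nums.sort(key=lambda c: int(c[len(prefix):]))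
--     others.sort(key=lambda c: c[len(prefix):])
--     return nums + others
-- ===== Notes on version B (the rewrite author's own statement) =====
-- stated objective: alternative
-- what changed: Replaces the single stable sort with a mixed tuple key (0,int(suffix))/(1,suffix) by a one-pass partition into numeric-suffix and other names followed by two independent sorts (by int and by raw suffix string) concatenated numeric-first.
import Mathlib
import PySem

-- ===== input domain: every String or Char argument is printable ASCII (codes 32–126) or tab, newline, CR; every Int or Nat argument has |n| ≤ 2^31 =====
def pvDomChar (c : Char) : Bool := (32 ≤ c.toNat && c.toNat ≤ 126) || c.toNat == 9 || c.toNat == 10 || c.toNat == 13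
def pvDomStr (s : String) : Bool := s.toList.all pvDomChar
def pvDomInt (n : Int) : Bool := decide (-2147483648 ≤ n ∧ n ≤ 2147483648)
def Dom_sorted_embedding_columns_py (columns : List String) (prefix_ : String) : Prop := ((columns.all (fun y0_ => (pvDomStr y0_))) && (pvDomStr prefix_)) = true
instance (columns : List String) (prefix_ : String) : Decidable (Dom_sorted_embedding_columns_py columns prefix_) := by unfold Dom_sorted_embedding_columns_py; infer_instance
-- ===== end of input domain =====

-- B replaces the one tuple-keyed stable sort by a single-pass partition into
-- numeric-suffix and other names, two plain sorts, and a concatenation (objective: alternative decomposition).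

-- ===== PORT A =====
-- shared helpers: the suffix name[len(prefix):], its isdigit test, and int(suffix)
def pvSuffix (prefix_ col : String) : String :=
  PySem.Str.slice col (some (PySem.Str.len prefix_ : Int)) none
def pvIsNum (prefix_ col : String) : Bool :=
  PySem.Str.strIsdigit (pvSuffix prefix_ col)
-- int(suffix): only used when isdigit holds, where ofStr? returns some; getD 0 is never the raw value
def pvNumKey (prefix_ col : String) : Int :=
  (PySem.Int.ofStr? (pvSuffix prefix_ col)).getD 0
-- Python's tuple key (0, int(suffix)) / (1, suffix): the tag-discriminated lexicographic
-- comparison is exactly the order on Lex (Int ⊕ String) (inl _ < inr _; inl by Int, inr by String)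
def pvKeyA (prefix_ name : String) : Lex (Int ⊕ String) :=
  if pvIsNum prefix_ name then toLex (Sum.inl (pvNumKey prefix_ name))
  else toLex (Sum.inr (pvSuffix prefix_ name))

def sorted_embedding_columns_py (columns : List String) (prefix_ : String) : List String :=
  let relevant := columns.filter (fun col => PySem.Str.startswith col prefix_)
  if relevant = [] then []
  else PySem.List.sorted relevant (pvKeyA prefix_)

-- ===== PORT B =====
-- the single partition pass of Source B (two append accumulators)
def pvPartitionNum (prefix_ : String) (relevant : List String) : List String × List String :=
  relevant.foldl
    (fun p col => if pvIsNum prefix_ col then (p.1 ++ [col], p.2) else (p.1, p.2 ++ [col]))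
    ([], [])

def sorted_embedding_columns_py_alt (columns : List String) (prefix_ : String) : List String :=
  let relevant := columns.filter (fun col => PySem.Str.startswith col prefix_)
  if relevant = [] then []
  else
    let p := pvPartitionNum prefix_ relevant
    PySem.List.sorted p.1 (fun c => pvNumKey prefix_ c)
      ++ PySem.List.sorted p.2 (fun c => pvSuffix prefix_ c)

-- ===== PRECONDITION & SPEC =====
def Spec_sorted_embedding_columns_py (columns : List String) (prefix_ : String) (out : List String) : Prop := out = sorted_embedding_columns_py_alt columns prefix_
instance (columns : List String) (prefix_ : String) (out : List String) : Decidable (Spec_sorted_embedding_columns_py columns prefix_ out) := by unfold Spec_sorted_embedding_columns_py; infer_instance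

-- ===== CLAIM (what is proved, stated in full; the proofs are below) =====
def Claim_equal_sorted_embedding_columns_py : Prop := ∀ (columns : List String) (prefix_ : String), Dom_sorted_embedding_columns_py columns prefix_ → Spec_sorted_embedding_columns_py columns prefix_ (sorted_embedding_columns_py columns prefix_)

-- ===== LEMMAS AND PROOFS =====

-- the partition fold is filter/filter-not
theorem pvPartition_fold (prefix_ : String) (xs accN accO : List String) :
    xs.foldl
      (fun p col => if pvIsNum prefix_ col then (p.1 ++ [col], p.2) else (p.1, p.2 ++ [col]))
      (accN, accO)
    = (accN ++ xs.filter (fun c => pvIsNum prefix_ c),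
       accO ++ xs.filter (fun c => !pvIsNum prefix_ c)) := by
  induction xs generalizing accN accO with
  | nil => simp
  | cons x t ih =>
    by_cases h : pvIsNum prefix_ x = true <;>
      simp [h, List.foldl_cons, ih]

-- inserting a numeric-suffix name into nums ++ others lands inside nums, by the Int key
theorem pvInsert_num (prefix_ : String) (x : String) (hx : pvIsNum prefix_ x = true)
    (accN accO : List String) (hN : ∀ y ∈ accN, pvIsNum prefix_ y = true)
    (hO : ∀ y ∈ accO, pvIsNum prefix_ y = false) :
    PySem.List.insertBy (fun a b => decide (pvKeyA prefix_ a < pvKeyA prefix_ b)) x (accN ++ accO)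
    = PySem.List.insertBy (fun a b => decide (pvNumKey prefix_ a < pvNumKey prefix_ b)) x accN ++ accO := by
  induction accN with
  | nil =>
    cases accO with
    | nil => simp [PySem.List.insertBy]
    | cons y t =>
      have hy : pvIsNum prefix_ y = false := hO y (by simp)
      have hlt : pvKeyA prefix_ x < pvKeyA prefix_ y := by
        simp [pvKeyA, hx, hy]
      simp [PySem.List.insertBy, hlt]
  | cons a t ih =>
    have ha : pvIsNum prefix_ a = true := hN a (by simp)
    have hk : (pvKeyA prefix_ x < pvKeyA prefix_ a) ↔ (pvNumKey prefix_ x < pvNumKey prefix_ a) := by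
      simp [pvKeyA, hx, ha]
    by_cases hlt : pvNumKey prefix_ x < pvNumKey prefix_ a
    · simp [PySem.List.insertBy, hk, hlt]
    · simp [PySem.List.insertBy, hk, hlt,
        ih (fun y hy => hN y (List.mem_cons_of_mem _ hy))]

-- inserting a non-numeric name into nums ++ others lands inside others, by the String key
theorem pvInsert_str (prefix_ : String) (x : String) (hx : pvIsNum prefix_ x = false)
    (accN accO : List String) (hN : ∀ y ∈ accN, pvIsNum prefix_ y = true)
    (hO : ∀ y ∈ accO, pvIsNum prefix_ y = false) :
    PySem.List.insertBy (fun a b => decide (pvKeyA prefix_ a < pvKeyA prefix_ b)) x (accN ++ accO)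
    = accN ++ PySem.List.insertBy (fun a b => decide (pvSuffix prefix_ a < pvSuffix prefix_ b)) x accO := by
  induction accN with
  | nil =>
    induction accO with
    | nil => simp [PySem.List.insertBy]
    | cons y t iht =>
      have hy : pvIsNum prefix_ y = false := hO y (by simp)
      have hk : (pvKeyA prefix_ x < pvKeyA prefix_ y) ↔ (pvSuffix prefix_ x < pvSuffix prefix_ y) := by
        simp [pvKeyA, hx, hy]
      by_cases hlt : pvSuffix prefix_ x < pvSuffix prefix_ y
      · simp [PySem.List.insertBy, hk, hlt]
      · have hb : (decide (pvKeyA prefix_ x < pvKeyA prefix_ y)) = false := by simp [hk, hlt]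
        have hb' : (decide (pvSuffix prefix_ x < pvSuffix prefix_ y)) = false := by simp [hlt]
        have ht := iht (fun z hz => hO z (List.mem_cons_of_mem _ hz))
        simp only [List.nil_append] at ht
        simp only [PySem.List.insertBy, hb, hb', Bool.false_eq_true, if_false, List.nil_append]
        rw [ht]
  | cons a t ih =>
    have ha : pvIsNum prefix_ a = true := hN a (by simp)
    have hna : ¬ (pvKeyA prefix_ x < pvKeyA prefix_ a) := by
      simp [pvKeyA, hx, ha]
    simp [PySem.List.insertBy, hna,
      ih (fun y hy => hN y (List.mem_cons_of_mem _ hy))]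

-- main invariant: the one insertion-sort fold over the mixed key equals the two
-- bucket folds, as long as the accumulators hold only their own kind of name
theorem pvMain (prefix_ : String) (xs : List String) :
    ∀ accN accO : List String, (∀ y ∈ accN, pvIsNum prefix_ y = true) →
    (∀ y ∈ accO, pvIsNum prefix_ y = false) →
    xs.foldl (fun acc x => PySem.List.insertBy (fun a b => decide (pvKeyA prefix_ a < pvKeyA prefix_ b)) x acc) (accN ++ accO)
    = (xs.filter (fun c => pvIsNum prefix_ c)).foldl
        (fun acc x => PySem.List.insertBy (fun a b => decide (pvNumKey prefix_ a < pvNumKey prefix_ b)) x acc) accN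
      ++ (xs.filter (fun c => !pvIsNum prefix_ c)).foldl
        (fun acc x => PySem.List.insertBy (fun a b => decide (pvSuffix prefix_ a < pvSuffix prefix_ b)) x acc) accO := by
  induction xs with
  | nil => intro accN accO _ _; simp
  | cons x t ih =>
    intro accN accO hN hO
    by_cases hx : pvIsNum prefix_ x = true
    · rw [List.foldl_cons, pvInsert_num prefix_ x hx accN accO hN hO]
      simp only [List.filter_cons, hx]
      simp only [Bool.not_true, if_pos, List.foldl_cons]
      exact ih _ accO
        (fun y hy => by
          rcases (PySem.List.mem_insertBy _ _ _ _).1 hy with h | h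
          · exact h ▸ hx
          · exact hN y h) hO
    · have hx' : pvIsNum prefix_ x = false := by simpa using hx
      rw [List.foldl_cons, pvInsert_str prefix_ x hx' accN accO hN hO]
      simp only [List.filter_cons, hx']
      simp only [Bool.not_false, if_pos, List.foldl_cons]
      exact ih accN _ hN
        (fun y hy => by
          rcases (PySem.List.mem_insertBy _ _ _ _).1 hy with h | h
          · exact h ▸ hx'
          · exact hO y h)

-- ===== VERDICT (by name: the statement is the Claim_ definition above) =====
theorem sorted_embedding_columns_py_spec : Claim_equal_sorted_embedding_columns_py := by
  intro columns prefix_ _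
  unfold Spec_sorted_embedding_columns_py sorted_embedding_columns_py sorted_embedding_columns_py_alt
  set relevant := columns.filter (fun col => PySem.Str.startswith col prefix_) with hrel
  by_cases h : relevant = []
  · simp [h]
  · simp only [if_neg h]
    have hp : pvPartitionNum prefix_ relevant
        = (relevant.filter (fun c => pvIsNum prefix_ c), relevant.filter (fun c => !pvIsNum prefix_ c)) := by
      unfold pvPartitionNum
      simpa using pvPartition_fold prefix_ relevant [] []
    rw [hp]
    rw [PySem.List.sorted_eq_foldl_insertBy, PySem.List.sorted_eq_foldl_insertBy,
        PySem.List.sorted_eq_foldl_insertBy]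
    simpa using pvMain prefix_ relevant [] [] (by simp) (by simp)
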